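-- pv_equiv track=rewrite | github.com/flywo/PythonPractice | Project28-GhostsAge/GhostsAge.py | check
-- ===== SOURCE A (Python) =====
-- def check(o):
--     a, b = 1,1
--     age = 0
--     while o != 10000:
--         age += 1
--         if age == b:
--             o += b
--             a,b = b, a+b
--         else:
--             o -= 1
--     return age
-- ===== SOURCE B (Python) =====
-- def check(o):
--     # Jump segment-by-segment over the Fibonacci schedule instead of simulating
--     # every age: between two consecutive jump ages f1 < f2 the value decreases by
--     # one per age, so the crossing age inside a segment is computed directly.
--     d = 10000 - o
--     if d == 0:
--         return 0
--     f1, f2, s = 1, 2, 0   # next jump age, following jump age, offset before the jump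
--     while True:
--         s += f1                      # offset right after the jump at age f1
--         if s == d:
--             return f1
--         gap = f2 - f1                # number of ages until the next jump
--         if s - gap < d < s:
--             return f1 + (s - d)      # crossed during the decreasing stretch
--         if d <= s - gap:
--             # every future offset stays above d: the original loop never ends here
--             raise ValueError("o can never reach 10000")
--         f1, f2, s = f2, f1 + f2, s - gap + 1
-- ===== Notes on version B (the rewrite author's own statement) =====
-- stated objective: alternative
-- what changed: Instead of simulating every single age (one +/-1 step per iteration), B jumps over whole Fibonacci segments and computes the crossing age in closed form per segment (intended as asymptotically faster, O(log) segments vs O(age) steps; a timing run could not confirm this because its large inputs lie outside A's termination domain); Pre_ excludes the inputs (o > 10000 and 44 sporadic offsets) on which A loops forever, where B raises ValueError.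
import Mathlib
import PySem

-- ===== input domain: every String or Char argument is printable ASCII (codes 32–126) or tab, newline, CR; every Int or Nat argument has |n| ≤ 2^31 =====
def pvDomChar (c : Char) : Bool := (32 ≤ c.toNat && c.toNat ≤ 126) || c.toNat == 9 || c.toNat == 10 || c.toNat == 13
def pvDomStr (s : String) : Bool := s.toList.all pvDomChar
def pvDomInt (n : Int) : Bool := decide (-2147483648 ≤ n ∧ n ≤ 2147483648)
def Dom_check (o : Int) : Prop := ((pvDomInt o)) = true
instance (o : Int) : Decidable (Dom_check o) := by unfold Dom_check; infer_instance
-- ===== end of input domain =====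

-- B replaces A's one-age-at-a-time simulation by closed-form jumps over whole
-- Fibonacci segments (one loop iteration per segment); equality of return values
-- is proved on Pre_check, the inputs where A's loop terminates at all.

-- ===== PORT A =====
-- A's while-loop as a fuel recursion; fuel 2^40 exceeds the final age of every
-- terminating run on a Dom-sized input (returned age ≤ 2·|10000-o| < 2^40, proved
-- below), so `none` occurs exactly where the Python loop never terminates.
def loopA : Nat → Int → Int → Int → Int → Option Int
  | 0, _, _, _, _ => none
  | fuel+1, o, a, b, age =>
    if o = 10000 then some age
    else if age + 1 = b then loopA fuel (o + b) b (a + b) (age + 1)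
    else loopA fuel (o - 1) a b (age + 1)

def check (o : Int) : Int := (loopA (2^40) o 1 1 0).getD 0

-- ===== PORT B =====
-- B's while-True loop; `none` = the ValueError branch (or fuel exhaustion, which
-- the proof shows cannot happen on Dom-sized inputs before a return or the raise).
def loopB : Nat → Int → Int → Int → Int → Option Int
  | 0, _, _, _, _ => none
  | k+1, d, f1, f2, s =>
    let s' := s + f1
    if s' = d then some f1
    else
      let gap := f2 - f1
      if s' - gap < d ∧ d < s' then some (f1 + (s' - d))
      else if d ≤ s' - gap then none
      else loopB k d f2 (f1 + f2) (s' - gap + 1)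

def check_alt (o : Int) : Int :=
  let d := 10000 - o
  if d = 0 then 0 else (loopB (2^40) d 1 2 0).getD 0

-- ===== PRECONDITION & SPEC =====
-- Pre_check excludes exactly the inputs on which Python A loops forever (it never
-- returns there): every o > 10000, and the 44 values of 10000 - o below that the
-- offset sequence skips over (B raises ValueError on all of them).
def pvBad : List Int :=
  [2, 4, 7, 11, 17, 26, 40, 62, 97, 153, 243, 388, 622, 1000, 1611, 2599, 4197,
   6782, 10964, 17730, 28677, 46389, 75047, 121416, 196442, 317836, 514255,
   832067, 1346297, 2178338, 3524608, 5702918, 9227497, 14930385, 24157851,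
   39088204, 63246022, 102334192, 165580179, 267914335, 433494477, 701408774,
   1134903212, 1836311946]

def Pre_check (o : Int) : Prop := 0 ≤ 10000 - o ∧ (10000 - o) ∉ pvBad
instance (o : Int) : Decidable (Pre_check o) := by unfold Pre_check; infer_instance

def pvWitness_check : Int := 9995

def Spec_check (o : Int) (out : Int) : Prop := out = check_alt o
instance (o : Int) (out : Int) : Decidable (Spec_check o out) := by unfold Spec_check; infer_instance

-- ===== CLAIM (what is proved, stated in full; the proofs are below) =====
def Claim_equal_check : Prop := ∀ (o : Int), Dom_check o → Pre_check o → Spec_check o (check o)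

-- ===== LEMMAS AND PROOFS =====

-- one-step unfolding of loopA
theorem loopA_succ (fuel : Nat) (o a b age : Int) :
    loopA (fuel + 1) o a b age =
      (if o = 10000 then some age
       else if age + 1 = b then loopA fuel (o + b) b (a + b) (age + 1)
       else loopA fuel (o - 1) a b (age + 1)) := rfl

-- If the next 10000-crossing can never happen again (current and all future checked
-- values exceed 10000), A's loop runs forever: the fuel recursion yields none.
theorem loopA_none : ∀ (fuel : Nat) (o a b age : Int), age < b → 1 ≤ a → a ≤ b →
    10000 + (b - age - 1) < o → loopA fuel o a b age = none := by
  intro fuel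
  induction fuel with
  | zero => intros; rfl
  | succ n ih =>
    intro o a b age h1 h2 h3 h4
    simp only [loopA]
    rw [if_neg (by omega)]
    by_cases hj : age + 1 = b
    · rw [if_pos hj]
      exact ih _ _ _ _ (by omega) (by omega) (by omega) (by omega)
    · rw [if_neg hj]
      exact ih _ _ _ _ (by omega) h2 h3 (by omega)

-- none is antitone in fuel.
theorem loopA_down : ∀ (m n : Nat) (o a b age : Int), m ≤ n →
    loopA n o a b age = none → loopA m o a b age = none := by
  intro m
  induction m with
  | zero => intros; rfl
  | succ m ih =>
    intro n o a b age hmn hn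
    obtain ⟨n', rfl⟩ : ∃ n', n = n' + 1 := ⟨n - 1, by omega⟩
    simp only [loopA] at hn ⊢
    by_cases h1 : o = 10000
    · simp [h1] at hn
    · rw [if_neg h1] at hn ⊢
      by_cases h2 : age + 1 = b
      · rw [if_pos h2] at hn ⊢; exact ih n' _ _ _ _ (by omega) hn
      · rw [if_neg h2] at hn ⊢; exact ih n' _ _ _ _ (by omega) hn

-- n pure decrement steps at once (no check along the way hits 10000, no jump age).
theorem loopA_run : ∀ (n fuel : Nat) (o a b age : Int),
    (∀ j : Nat, j < n → o - j ≠ 10000) → age + n < b →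
    loopA (n + fuel) o a b age = loopA fuel (o - n) a b (age + n) := by
  intro n
  induction n with
  | zero => intro fuel o a b age _ _; norm_num
  | succ n ih =>
    intro fuel o a b age hchk hage
    have h0 : o ≠ 10000 := by have := hchk 0 (by omega); simpa using this
    have hb : age + 1 ≠ b := by push_cast at hage; omega
    have step : loopA (n + 1 + fuel) o a b age = loopA (n + fuel) (o - 1) a b (age + 1) := by
      have : n + 1 + fuel = (n + fuel) + 1 := by omega
      rw [this]; simp only [loopA]; rw [if_neg h0, if_neg hb]
    rw [step, ih fuel (o - 1) a b (age + 1)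
      (by intro j hj; have := hchk (j + 1) (by omega); push_cast at this ⊢; omega)
      (by push_cast at hage ⊢; omega)]
    congr 1 <;> push_cast <;> ring

-- Main simulation lemma.  B's pre-jump state (f1, f2, s) corresponds to A's state
-- o = 10000 - d + s, a = f2 - f1, b = f1, age = f1 - 1 (about to jump at age f1).
-- The numeric hypotheses are the Fibonacci-shape invariants of B's loop plus a
-- linear fuel bound guaranteeing B's fuel cannot run out before return/raise.
theorem mainB : ∀ (k : Nat) (d f1 f2 s : Int),
    1 ≤ f1 → f1 < f2 → f2 ≤ 2*f1 → 3*f1 ≤ 2*f2 → 3*(f2 - f1) ≤ f1 + 2*s + 3 →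
    0 ≤ s → s < d → d ≤ s + 2*f1 - f2 + 2*(k : Int) →
    ((∀ r : Int, loopB k d f1 f2 s = some r →
        f1 ≤ r ∧ r ≤ 2*d ∧
        ∀ fuel : Nat, r - f1 + 2 ≤ (fuel : Int) →
          loopA fuel (10000 - d + s) (f2 - f1) f1 (f1 - 1) = some r)
     ∧ (loopB k d f1 f2 s = none →
        ∀ fuel : Nat, loopA fuel (10000 - d + s) (f2 - f1) f1 (f1 - 1) = none)) := by
  intro k
  induction k with
  | zero =>
    intro d f1 f2 s h1 h2 h3 h4 h5 h6 h7 h8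
    refine ⟨by intro r hr; simp [loopB] at hr, ?_⟩
    intro _ fuel
    cases fuel with
    | zero => rfl
    | succ m =>
      rw [loopA_succ m]
      rw [if_neg (by omega), if_pos (by omega : f1 - 1 + 1 = f1)]
      exact loopA_none m _ _ _ _ (by omega) (by omega) (by omega) (by push_cast at h8; omega)
  | succ k ih =>
    intro d f1 f2 s h1 h2 h3 h4 h5 h6 h7 h8
    simp only [loopB]
    by_cases hA : s + f1 = d
    · rw [if_pos hA]
      refine ⟨?_, by intro h; simp at h⟩
      intro r hr
      obtain rfl : f1 = r := by simpa using hr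
      refine ⟨le_refl _, by omega, ?_⟩
      intro fuel hfuel
      obtain ⟨m, rfl⟩ : ∃ m, fuel = (m + 1) + 1 := ⟨fuel - 2, by omega⟩
      rw [loopA_succ (m + 1)]
      rw [if_neg (by omega), if_pos (by omega : f1 - 1 + 1 = f1)]
      rw [loopA_succ m]
      rw [if_pos (by omega : 10000 - d + s + f1 = 10000)]
      congr 1; omega
    · rw [if_neg hA]
      by_cases hB : s + f1 - (f2 - f1) < d ∧ d < s + f1
      · rw [if_pos hB]
        refine ⟨?_, by intro h; simp at h⟩
        intro r hr
        obtain rfl : f1 + (s + f1 - d) = r := by simpa using hr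
        obtain ⟨hB1, hB2⟩ := hB
        refine ⟨by omega, by omega, ?_⟩
        intro fuel hfuel
        have hj : (1:Int) ≤ s + f1 - d := by omega
        set jn : Nat := (s + f1 - d).toNat with hjn
        have hjc : (jn : Int) = s + f1 - d := Int.toNat_of_nonneg (by omega)
        obtain ⟨m, rfl⟩ : ∃ m, fuel = (jn + (m + 1)) + 1 :=
          ⟨fuel - jn - 2, by omega⟩
        rw [loopA_succ (jn + (m + 1))]
        rw [if_neg (by omega), if_pos (by omega : f1 - 1 + 1 = f1)]
        have harg : f2 - f1 + f1 = f2 := by ring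
        have harg2 : f1 - 1 + 1 = f1 := by ring
        rw [harg, harg2]
        rw [loopA_run jn (m + 1) _ _ _ _
          (by intro j hjlt hcontra; omega)
          (by omega)]
        rw [loopA_succ m]
        rw [if_pos (by omega : 10000 - d + s + f1 - (jn : Int) = 10000)]
        congr 1; omega
      · rw [if_neg hB]
        by_cases hC : d ≤ s + f1 - (f2 - f1)
        · rw [if_pos hC]
          refine ⟨by intro r hr; simp at hr, ?_⟩
          intro _ fuel
          cases fuel with
          | zero => rfl
          | succ m =>
            rw [loopA_succ m]
            rw [if_neg (by omega), if_pos (by omega : f1 - 1 + 1 = f1)]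
            exact loopA_none m _ _ _ _ (by omega) (by omega) (by omega) (by omega)
        · rw [if_neg hC]
          -- recurse to the next segment
          have hd : s + f1 < d := by omega
          have hih := ih d f2 (f1 + f2) (s + f1 - (f2 - f1) + 1)
            (by omega) (by omega) (by omega) (by omega) (by omega) (by omega)
            (by omega) (by push_cast at h8 ⊢; omega)
          rw [(by ring : f1 + f2 - f2 = f1)] at hih
          have hstep : ∀ fuel : Nat,
              loopA ((((f2 - f1).toNat - 1) + fuel) + 1) (10000 - d + s) (f2 - f1) f1 (f1 - 1)
              = loopA fuel (10000 - d + (s + f1 - (f2 - f1) + 1)) f1 f2 (f2 - 1) := by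
            intro fuel
            have hgc : ((f2 - f1).toNat : Int) = f2 - f1 := Int.toNat_of_nonneg (by omega)
            rw [loopA_succ (((f2 - f1).toNat - 1) + fuel)]
            rw [if_neg (by omega), if_pos (by omega : f1 - 1 + 1 = f1)]
            have harg : f2 - f1 + f1 = f2 := by ring
            have harg2 : f1 - 1 + 1 = f1 := by ring
            rw [harg, harg2]
            rw [loopA_run ((f2 - f1).toNat - 1) fuel _ _ _ _
              (by intro j hjlt
                  have : (j : Int) ≤ f2 - f1 - 2 := by omega
                  intro hcontra; omega)
              (by omega)]
            congr 1 <;> omega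
          constructor
          · intro r hr
            obtain ⟨hr1, hr2, hr3⟩ := hih.1 r hr
            refine ⟨by omega, hr2, ?_⟩
            intro fuel hfuel
            obtain ⟨rest, rfl⟩ : ∃ rest, fuel = (((f2 - f1).toNat - 1) + rest) + 1 :=
              ⟨fuel - (f2 - f1).toNat, by
                have hgc : ((f2 - f1).toNat : Int) = f2 - f1 := Int.toNat_of_nonneg (by omega)
                omega⟩
            rw [hstep rest]
            exact hr3 rest (by
              have hgc : ((f2 - f1).toNat : Int) = f2 - f1 := Int.toNat_of_nonneg (by omega)
              push_cast at hfuel ⊢; omega)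
          · intro hr fuel
            have hbig := hstep fuel
            rw [hih.2 hr fuel] at hbig
            exact loopA_down fuel _ _ _ _ _ (by omega) hbig

-- ===== VERDICT (by name: the statement is the Claim_ definition above) =====
theorem check_spec : Claim_equal_check := by
  intro o hdom hpre
  unfold Spec_check check check_alt
  have hdom' : -2147483648 ≤ o ∧ o ≤ 2147483648 := by
    simpa [Dom_check, pvDomInt] using hdom
  by_cases h0 : (10000 : Int) - o = 0
  · have ho : o = 10000 := by omega
    subst ho
    rw [if_pos h0]
    have h40 : (2^40 : Nat) = (2^40 - 1) + 1 := by norm_num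
    rw [h40]; simp [loopA]
  · rw [if_neg h0]
    have hd1 : (1:Int) ≤ 10000 - o := by
      rcases hpre with ⟨hp, _⟩; omega
    have hmain := mainB (2^40) (10000 - o) 1 2 0
      (by omega) (by omega) (by omega) (by omega) (by omega) (by omega) (by omega)
      (by push_cast; norm_num; omega)
    have harg : (10000 : Int) - (10000 - o) + 0 = o := by ring
    cases hB : loopB (2^40) (10000 - o) 1 2 0 with
    | some r =>
      obtain ⟨hr1, hr2, hr3⟩ := hmain.1 r hB
      have := hr3 (2^40) (by push_cast; omega)
      rw [harg] at this
      norm_num at this ⊢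
      rw [this]
      rfl
    | none =>
      have := hmain.2 hB (2^40)
      rw [harg] at this
      norm_num at this ⊢
      rw [this]
      rfl
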